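-- pv_equiv track=rewrite | github.com/tvdyb/mm-setup | kalshi_rewards_app.py | expand_levels_to_contracts
-- ===== SOURCE A (Python) =====
-- def expand_levels_to_contracts(levels, cap):
--     out = []
--     for px, sz in levels:
--         n = int(sz)
--         for _ in range(n):
--             if len(out) >= cap: return out
--             out.append(px)
--     return out
-- ===== SOURCE B (Python) =====
-- def expand_levels_to_contracts(levels, cap):
--     # stage 1: cumulative start offset of each level within the full expansion
--     starts = [0]
--     for _, sz in levels:
--         starts.append(starts[-1] + max(0, int(sz)))
--     # stage 2: level [lo, hi) contributes |[lo, hi) intersect [0, cap)| copies of its price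
--     out = []
--     for (px, _), lo, hi in zip(levels, starts, starts[1:]):
--         take = min(hi, cap) - lo
--         if take > 0:
--             out += [px] * take
--     return out
-- ===== Notes on version B (the rewrite author's own statement) =====
-- stated objective: alternative
-- what changed: Replaces the append-and-check-length loop with a two-stage prefix-sum scheme: first the cumulative start offset of each level in the full expansion, then each level contributes |[lo,hi) ∩ [0,cap)| copies of its price by interval arithmetic; no output-length check and no early return.
import Mathlib
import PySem

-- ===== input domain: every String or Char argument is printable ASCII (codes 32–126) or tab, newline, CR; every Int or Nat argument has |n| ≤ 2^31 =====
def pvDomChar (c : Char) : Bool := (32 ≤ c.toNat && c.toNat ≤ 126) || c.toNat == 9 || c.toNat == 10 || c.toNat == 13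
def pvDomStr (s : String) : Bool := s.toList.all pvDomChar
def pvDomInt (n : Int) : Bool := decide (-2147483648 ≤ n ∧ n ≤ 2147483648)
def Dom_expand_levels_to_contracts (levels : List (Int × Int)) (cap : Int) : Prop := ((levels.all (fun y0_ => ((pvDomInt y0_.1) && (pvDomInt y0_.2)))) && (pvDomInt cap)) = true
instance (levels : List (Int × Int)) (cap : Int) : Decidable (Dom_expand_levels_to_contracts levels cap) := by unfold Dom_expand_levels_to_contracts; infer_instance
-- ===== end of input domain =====

-- B replaces A's append-and-check-length loop with a two-stage prefix-sum scheme: compute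
-- each level's start offset, then emit per level the size of [lo,hi) ∩ [0,cap); objective: alternative.

-- ===== PORT A =====
-- inner 'for _ in range(n)' loop; returns (out, earlyReturn?)
def pvInnerA (px : Int) (cap : Int) : Nat → List Int → (List Int × Bool)
  | 0, out => (out, false)
  | n+1, out =>
      if (out.length : Int) ≥ cap then (out, true)
      else pvInnerA px cap n (out ++ [px])

-- outer 'for px, sz in levels' loop
def pvOuterA (cap : Int) : List (Int × Int) → List Int → List Int
  | [], out => out
  | (px, sz) :: rest, out =>
      let r := pvInnerA px cap sz.toNat out   -- int(sz); range(n) runs max(0,n) times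
      if r.2 then r.1 else pvOuterA cap rest r.1

def expand_levels_to_contracts (levels : List (Int × Int)) (cap : Int) : List Int :=
  pvOuterA cap levels []

-- ===== PORT B =====
-- stage 1: 'starts = [0]; for _, sz in levels: starts.append(starts[-1] + max(0, int(sz)))'
def pvStartsB (levels : List (Int × Int)) : List Int :=
  levels.foldl (fun st p => st ++ [st.getLast! + max 0 p.2]) [0]

-- stage 2: 'for (px, _), lo, hi in zip(levels, starts, starts[1:]): take = min(hi,cap)-lo; if take>0: out += [px]*take'
def expand_levels_to_contracts_alt (levels : List (Int × Int)) (cap : Int) : List Int :=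
  let starts := pvStartsB levels
  (levels.zip (starts.zip starts.tail)).foldl
    (fun out t =>
      let take := min t.2.2 cap - t.2.1
      if take > 0 then out ++ List.replicate take.toNat t.1.1 else out) []

-- ===== PRECONDITION & SPEC =====
def Spec_expand_levels_to_contracts (levels : List (Int × Int)) (cap : Int) (out : List Int) : Prop := out = expand_levels_to_contracts_alt levels cap
instance (levels : List (Int × Int)) (cap : Int) (out : List Int) : Decidable (Spec_expand_levels_to_contracts levels cap out) := by unfold Spec_expand_levels_to_contracts; infer_instance

-- ===== CLAIM (what is proved, stated in full; the proofs are below) =====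
def Claim_equal_expand_levels_to_contracts : Prop := ∀ (levels : List (Int × Int)) (cap : Int), Dom_expand_levels_to_contracts levels cap → Spec_expand_levels_to_contracts levels cap (expand_levels_to_contracts levels cap)

-- ===== LEMMAS AND PROOFS =====

-- characterisation of the inner loop of A
theorem pvInnerA_eq (px cap : Int) (n : Nat) (out : List Int)
    (h : out.length ≤ (max 0 cap).toNat) :
    pvInnerA px cap n out =
      (out ++ List.replicate (min n ((max 0 cap).toNat - out.length)) px,
       decide ((max 0 cap).toNat < out.length + n)) := by
  induction n generalizing out with
  | zero => simp [pvInnerA]; omega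
  | succ n ih =>
    rw [pvInnerA]
    by_cases hc : (out.length : Int) ≥ cap
    · simp only [if_pos hc]
      have : min (n+1) ((max 0 cap).toNat - out.length) = 0 := by omega
      simp [this]; omega
    · simp only [if_neg hc]
      rw [ih (out ++ [px]) (by simp; omega)]
      refine Prod.ext ?_ ?_
      · show out ++ [px] ++ _ = out ++ _
        rw [List.append_assoc]
        congr 1
        show _ = List.replicate (min (n+1) ((max 0 cap).toNat - out.length)) px
        rw [List.singleton_append, ← List.replicate_succ]
        congr 1
        simp; omega
      · simp only [decide_eq_decide]
        simp; omega

-- A's result is the cap-truncation of the full expansion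
theorem pvOuterA_eq (cap : Int) (levels : List (Int × Int)) (out : List Int)
    (h : out.length ≤ (max 0 cap).toNat) :
    pvOuterA cap levels out =
      out ++ (levels.flatMap (fun p => List.replicate (max 0 p.2).toNat p.1)).take
               ((max 0 cap).toNat - out.length) := by
  induction levels generalizing out with
  | nil => simp [pvOuterA]
  | cons hd tl ih =>
    obtain ⟨px, sz⟩ := hd
    rw [pvOuterA, pvInnerA_eq px cap sz.toNat out h]
    have hmax : (max 0 sz).toNat = sz.toNat := by omega
    simp only [List.flatMap_cons, hmax, List.take_append, List.take_replicate,
      List.length_replicate]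
    by_cases he : (max 0 cap).toNat < out.length + sz.toNat
    · simp only [he, decide_true]
      have h2 : (max 0 cap).toNat - out.length - sz.toNat = 0 := by omega
      have h3 : min sz.toNat ((max 0 cap).toNat - out.length)
          = (max 0 cap).toNat - out.length := by omega
      have h1 : min ((max 0 cap).toNat - out.length) sz.toNat
          = (max 0 cap).toNat - out.length := by omega
      simp [h1, h2, h3]
    · simp only [he, decide_false]
      rw [if_neg (by simp)]
      have h3 : min sz.toNat ((max 0 cap).toNat - out.length) = sz.toNat := by omega
      rw [ih _ (by simp [h3]; omega)]
      have h1 : min ((max 0 cap).toNat - out.length) sz.toNat = sz.toNat := by omega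
      simp [h1, h3, List.append_assoc, Nat.sub_sub]

-- prefix-sum scan (proof-only helper for characterising pvStartsB)
def pvScan (a : Int) : List (Int × Int) → List Int
  | [] => [a]
  | p :: rest => a :: pvScan (a + max 0 p.2) rest

-- the stage-1 fold builds the prefix-sum scan
theorem pvStartsB_fold (levels : List (Int × Int)) (pre : List Int) (a : Int) :
    levels.foldl (fun st p => st ++ [st.getLast! + max 0 p.2]) (pre ++ [a])
      = pre ++ pvScan a levels := by
  induction levels generalizing pre a with
  | nil => simp [pvScan]
  | cons hd tl ih =>
    rw [List.foldl_cons]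
    have hl : (pre ++ [a]).getLast! = a := by
      rw [List.getLast!_eq_getLast?_getD]; simp
    rw [hl, ih (pre ++ [a]) (a + max 0 hd.2)]
    simp [pvScan]

theorem pvStartsB_eq (levels : List (Int × Int)) :
    pvStartsB levels = pvScan 0 levels := by
  have := pvStartsB_fold levels [] 0
  simpa [pvStartsB] using this

-- stage-2 fold over the zipped scan equals the cap-truncation of the full expansion
theorem pvStageB_eq (cap : Int) (levels : List (Int × Int)) (t : Int) (out : List Int) :
    (levels.zip ((pvScan t levels).zip (pvScan t levels).tail)).foldl
      (fun out q =>
        let take := min q.2.2 cap - q.2.1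
        if take > 0 then out ++ List.replicate take.toNat q.1.1 else out) out
    = out ++ (levels.flatMap (fun p => List.replicate (max 0 p.2).toNat p.1)).take
               (max 0 (cap - t)).toNat := by
  induction levels generalizing t out with
  | nil => simp [pvScan]
  | cons hd tl ih =>
    rw [show pvScan t (hd :: tl) = t :: pvScan (t + max 0 hd.2) tl from rfl]
    set t' := t + max 0 hd.2 with ht'
    have hsc : pvScan t' tl = t' :: (pvScan t' tl).tail := by
      cases tl <;> simp [pvScan]
    rw [List.tail_cons]
    conv_lhs => rw [hsc]
    rw [List.zip_cons_cons, List.zip_cons_cons, List.foldl_cons, ← hsc]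
    rw [ih t' _]
    simp only [List.flatMap_cons, List.take_append, List.take_replicate,
      List.length_replicate]
    have hs : (0:Int) ≤ max 0 hd.2 := le_max_left _ _
    by_cases hp : min t' cap - t > 0
    · rw [if_pos hp]
      have h1 : min (max 0 (cap - t)).toNat (max 0 hd.2).toNat = (min t' cap - t).toNat := by
        omega
      have h2 : (max 0 (cap - t)).toNat - (max 0 hd.2).toNat = (max 0 (cap - t')).toNat := by
        omega
      rw [List.append_assoc, h1, h2]
    · rw [if_neg hp]
      have h1 : min (max 0 (cap - t)).toNat (max 0 hd.2).toNat = 0 := by omega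
      have h2 : (max 0 (cap - t)).toNat - (max 0 hd.2).toNat = (max 0 (cap - t')).toNat := by
        omega
      rw [h1, h2]
      simp

-- ===== VERDICT (by name: the statement is the Claim_ definition above) =====
theorem expand_levels_to_contracts_spec : Claim_equal_expand_levels_to_contracts := by
  intro levels cap _
  unfold Spec_expand_levels_to_contracts expand_levels_to_contracts expand_levels_to_contracts_alt
  rw [pvOuterA_eq cap levels [] (by simp), pvStartsB_eq, pvStageB_eq]
  simp only [List.length_nil, Nat.sub_zero, List.nil_append]
  congr 1
  omega
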